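-- pv_equiv track=rewrite | github.com/Dhia-HajAli/ArResumer | resumer.py | sent_pos_text
-- ===== SOURCE A (Python) =====
-- import math
--
-- def sent_pos_text(sentences):
--     sent_pos_text = {}
--     for sent in sentences:
--         if ((sentences.index(sent)+1)<=math.ceil(len(sentences)*1/3)):
--             sent_pos_text[sent] = 1
--         elif((sentences.index(sent)+1)>math.ceil(len(sentences)*2/3)):
--             sent_pos_text[sent] = 3
--         else:
--             sent_pos_text[sent] = 2
--     return sent_pos_text
-- ===== SOURCE B (Python) =====
-- import math
--
-- def sent_pos_text(sentences):
--     n = len(sentences)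
--     t1 = math.ceil(n * 1 / 3)
--     t2 = math.ceil(n * 2 / 3)
--     result = {}
--     for chunk, label in ((sentences[:t1], 1), (sentences[t1:t2], 2), (sentences[t2:], 3)):
--         for s in chunk:
--             result.setdefault(s, label)
--     return result
-- ===== Notes on version B (the rewrite author's own statement) =====
-- stated objective: faster
-- what changed: B precomputes the two ceil thresholds once, partitions the list into three slices labelled 1/2/3, and fills the dict with setdefault so the first-occurrence label wins, removing A's per-element list.index scan and repeated threshold computation.
import Mathlib
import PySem

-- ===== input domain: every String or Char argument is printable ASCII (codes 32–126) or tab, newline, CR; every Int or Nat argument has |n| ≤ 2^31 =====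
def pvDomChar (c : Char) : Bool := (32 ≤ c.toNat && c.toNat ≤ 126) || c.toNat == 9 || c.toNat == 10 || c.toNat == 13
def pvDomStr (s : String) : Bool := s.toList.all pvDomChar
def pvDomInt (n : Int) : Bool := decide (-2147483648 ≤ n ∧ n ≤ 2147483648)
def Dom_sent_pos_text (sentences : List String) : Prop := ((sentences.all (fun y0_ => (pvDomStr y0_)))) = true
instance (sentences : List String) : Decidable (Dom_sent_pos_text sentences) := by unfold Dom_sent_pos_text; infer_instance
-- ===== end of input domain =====

-- B partitions the list into three label slices and fills the dict with setdefault (first occurrence wins),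
-- removing A's per-element list.index scan: O(n) instead of O(n^2).

-- math.ceil(n*1/3) / math.ceil(n*2/3) for a list length n, exact (ceiling of an exact rational;
-- the float detour in Python is exact for all list lengths).
def pvCeil3 (n : Nat) : Nat := (n + 2) / 3
def pvCeil23 (n : Nat) : Nat := (2 * n + 2) / 3

-- ===== PORT A =====
def sent_pos_text (sentences : List String) : List (String × Int) :=
  (sentences.foldl (fun d sent =>
      match PySem.List.index? sentences sent with
      | some i =>
        if i + 1 ≤ pvCeil3 sentences.length then d.insert sent 1
        else if i + 1 > pvCeil23 sentences.length then d.insert sent 3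
        else d.insert sent 2
      | none => d   -- unreachable: sent ∈ sentences
    ) PySem.Dict.empty).items

-- ===== PORT B =====
def sent_pos_text_alt (sentences : List String) : List (String × Int) :=
  let n := sentences.length
  let t1 := pvCeil3 n
  let t2 := pvCeil23 n
  let chunks : List (List String × Int) :=
    [(PySem.List.slice sentences none (some (t1 : Int)), 1),
     (PySem.List.slice sentences (some (t1 : Int)) (some (t2 : Int)), 2),
     (PySem.List.slice sentences (some (t2 : Int)) none, 3)]
  (chunks.foldl (fun d p =>
      p.1.foldl (fun d s => d.setdefault s p.2) d) PySem.Dict.empty).items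

-- ===== PRECONDITION & SPEC =====
def Spec_sent_pos_text (sentences : List String) (out : List (String × Int)) : Prop := out = sent_pos_text_alt sentences
instance (sentences : List String) (out : List (String × Int)) : Decidable (Spec_sent_pos_text sentences out) := by unfold Spec_sent_pos_text; infer_instance

-- ===== CLAIM (what is proved, stated in full; the proofs are below) =====
def Claim_equal_sent_pos_text : Prop := ∀ (sentences : List String), Dom_sent_pos_text sentences → Spec_sent_pos_text sentences (sent_pos_text sentences)

-- ===== LEMMAS AND PROOFS =====

-- label assigned to position i in a list of length n (A's branch order)
def pvLab (n i : Nat) : Int :=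
  if i + 1 ≤ pvCeil3 n then 1 else if i + 1 > pvCeil23 n then 3 else 2

-- label of a sentence by its first occurrence (arbitrary when absent; only used for members)
def pvLabOf (xs : List String) (s : String) : Int :=
  match PySem.List.index? xs s with
  | some i => pvLab xs.length i
  | none => 2

-- the common canonical loop both ports are reduced to
def pvSD (xs : List String) (d : PySem.Dict String Int) (ys : List String) : PySem.Dict String Int :=
  ys.foldl (fun d s => d.setdefault s (pvLabOf xs s)) d

lemma pv_insert_eq_self (d : PySem.Dict String Int) (s : String) (v : Int)
    (hc : d.contains s = true) (hv : ∀ p ∈ d.items, p.1 = s → p.2 = v) :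
    d.insert s v = d := by
  unfold PySem.Dict.insert
  rw [if_pos hc]
  cases d with
  | mk items =>
    congr 1
    rw [List.map_eq_iff]
    intro i
    cases h : items[i]? with
    | none => simp
    | some p =>
      simp only [Option.map_some, Option.some.injEq]
      by_cases he : p.1 = s
      · have hps := hv p (List.mem_of_getElem? h) he
        rw [if_pos (beq_iff_eq.mpr he)]
        exact Prod.ext (by simp [he]) (by simp [hps])
      · simp [he]

lemma pv_insert_not_contains (d : PySem.Dict String Int) (s : String) (v : Int)
    (hc : d.contains s = false) :
    d.insert s v = PySem.Dict.mk (d.items ++ [(s, v)]) := by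
  unfold PySem.Dict.insert
  rw [if_neg (by simp [hc])]

lemma pv_setdefault_not_contains (d : PySem.Dict String Int) (s : String) (v : Int)
    (hc : d.contains s = false) :
    d.setdefault s v = PySem.Dict.mk (d.items ++ [(s, v)]) := by
  unfold PySem.Dict.setdefault
  rw [if_neg (by simp [hc])]

lemma pv_contains_append (items : List (String × Int)) (s y : String) (v : Int) :
    (PySem.Dict.mk (items ++ [(y, v)])).contains s =
      ((PySem.Dict.mk items : PySem.Dict String Int).contains s || (y == s)) := by
  simp [PySem.Dict.contains, List.any_append]

-- A's loop body equals the canonical setdefault loop, given the value invariant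
lemma pv_lemA (xs : List String) (ys : List String) (d : PySem.Dict String Int)
    (hmem : ∀ s ∈ ys, s ∈ xs)
    (hinv : ∀ p ∈ d.items, p.2 = pvLabOf xs p.1) :
    ys.foldl (fun d sent =>
      match PySem.List.index? xs sent with
      | some i =>
        if i + 1 ≤ pvCeil3 xs.length then d.insert sent 1
        else if i + 1 > pvCeil23 xs.length then d.insert sent 3
        else d.insert sent 2
      | none => d) d = pvSD xs d ys := by
  induction ys generalizing d with
  | nil => rfl
  | cons y ys ih =>
    have hy : y ∈ xs := hmem y (by simp)
    obtain ⟨i, hi⟩ : ∃ i, PySem.List.index? xs y = some i := by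
      have := (PySem.List.index?_isSome_iff xs y).mpr hy
      cases h : PySem.List.index? xs y with
      | none => rw [h] at this; simp at this
      | some i => exact ⟨i, rfl⟩
    have hstep : (match PySem.List.index? xs y with
      | some i =>
        if i + 1 ≤ pvCeil3 xs.length then d.insert y 1
        else if i + 1 > pvCeil23 xs.length then d.insert y 3
        else d.insert y 2
      | none => d) = d.insert y (pvLabOf xs y) := by
      rw [hi]; unfold pvLabOf; rw [hi]; unfold pvLab
      dsimp only
      split_ifs <;> rfl
    have hins : d.insert y (pvLabOf xs y) = d.setdefault y (pvLabOf xs y) := by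
      by_cases hc : d.contains y = true
      · rw [pv_insert_eq_self d y _ hc (fun p hp he => by rw [hinv p hp, he]),
            PySem.Dict.setdefault_of_contains _ _ hc]
      · rw [pv_insert_not_contains d y _ (by simpa using hc),
            pv_setdefault_not_contains d y _ (by simpa using hc)]
    rw [List.foldl_cons, hstep, hins]
    unfold pvSD
    rw [List.foldl_cons]
    exact ih _ (fun s hs => hmem s (by simp [hs])) (by
      by_cases hc : d.contains y = true
      · rw [PySem.Dict.setdefault_of_contains _ _ hc]; exact hinv
      · rw [pv_setdefault_not_contains d y _ (by simpa using hc)]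
        intro p hp
        rcases List.mem_append.mp hp with h | h
        · exact hinv p h
        · simp at h; subst h; rfl)

-- a constant-labelled segment fold equals the canonical fold (and we track membership)
lemma pv_lemB (xs : List String) (ys pre r : List String) (c : Int) (d : PySem.Dict String Int)
    (hxs : xs = pre ++ ys ++ r)
    (hlab : ∀ j, j < ys.length → pvLab xs.length (pre.length + j) = c)
    (hinv : ∀ s, d.contains s = true ↔ s ∈ pre) :
    ys.foldl (fun d s => d.setdefault s c) d = pvSD xs d ys := by
  induction ys generalizing pre d with
  | nil => rfl
  | cons y ys ih =>
    have hstep : d.setdefault y c = d.setdefault y (pvLabOf xs y) ∧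
        ∀ s, (d.setdefault y c).contains s = true ↔ s ∈ pre ++ [y] := by
      by_cases hc : d.contains y = true
      · refine ⟨by rw [PySem.Dict.setdefault_of_contains _ _ hc,
                       PySem.Dict.setdefault_of_contains _ _ hc], ?_⟩
        intro s
        rw [PySem.Dict.setdefault_of_contains _ _ hc, hinv]
        have hy : y ∈ pre := (hinv y).mp hc
        constructor
        · intro h; exact List.mem_append.mpr (Or.inl h)
        · intro h; rcases List.mem_append.mp h with h | h
          · exact h
          · simp at h; subst h; exact hy
      · have hcf : d.contains y = false := by simpa using hc
        have hyp : y ∉ pre := fun h => hc ((hinv y).mpr h)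
        have hidx : PySem.List.index? xs y = some pre.length := by
          rw [PySem.List.index?_eq_some_iff]
          exact ⟨pre, ys ++ r, by simpa using hxs, rfl, hyp⟩
        have hlabel : pvLabOf xs y = c := by
          unfold pvLabOf; rw [hidx]
          simpa using hlab 0 (by simp)
        refine ⟨by rw [hlabel], ?_⟩
        intro s
        rw [pv_setdefault_not_contains d y _ hcf]
        cases d with
        | mk items =>
          rw [pv_contains_append items s y c]
          constructor
          · intro h
            rcases Bool.or_eq_true_iff.mp h with h | h
            · exact List.mem_append.mpr (Or.inl ((hinv s).mp h))
            · simp at h; subst h; exact List.mem_append.mpr (Or.inr (by simp))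
          · intro h
            rcases List.mem_append.mp h with h | h
            · exact Bool.or_eq_true_iff.mpr (Or.inl ((hinv s).mpr h))
            · simp at h; subst h; exact Bool.or_eq_true_iff.mpr (Or.inr (by simp))
    rw [List.foldl_cons, hstep.1]
    unfold pvSD
    rw [List.foldl_cons]
    exact ih (pre ++ [y]) _ (by simpa using hxs)
      (fun j hj => by
        have := hlab (j + 1) (by simpa using hj)
        simpa [Nat.add_assoc, Nat.add_comm 1 j] using this)
      (by intro s; rw [← hstep.1]; exact hstep.2 s)

-- membership after a canonical fold
lemma pv_contains_pvSD (xs ys : List String) (d : PySem.Dict String Int) (s : String) :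
    ((pvSD xs d ys).contains s = true) ↔ (d.contains s = true ∨ s ∈ ys) := by
  induction ys generalizing d with
  | nil => simp [pvSD]
  | cons y ys ih =>
    unfold pvSD
    rw [List.foldl_cons]
    have := ih (d.setdefault y (pvLabOf xs y))
    unfold pvSD at this
    rw [this]
    by_cases hc : d.contains y = true
    · rw [PySem.Dict.setdefault_of_contains _ _ hc]
      constructor
      · rintro (h | h)
        · exact Or.inl h
        · exact Or.inr (by simp [h])
      · rintro (h | h)
        · exact Or.inl h
        · rcases List.mem_cons.mp h with h | h
          · subst h; exact Or.inl hc
          · exact Or.inr h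
    · rw [pv_setdefault_not_contains d y _ (by simpa using hc)]
      cases d with
      | mk items =>
        rw [pv_contains_append items s y _]
        constructor
        · rintro (h | h)
          · rcases Bool.or_eq_true_iff.mp h with h | h
            · exact Or.inl h
            · simp at h; subst h; exact Or.inr (by simp)
          · exact Or.inr (by simp [h])
        · rintro (h | h)
          · exact Or.inl (Bool.or_eq_true_iff.mpr (Or.inl h))
          · rcases List.mem_cons.mp h with h | h
            · subst h; exact Or.inl (Bool.or_eq_true_iff.mpr (Or.inr (by simp)))
            · exact Or.inr h

-- ===== VERDICT (by name: the statement is the Claim_ definition above) =====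
theorem sent_pos_text_spec : Claim_equal_sent_pos_text := by
  intro xs _
  unfold Spec_sent_pos_text
  unfold sent_pos_text sent_pos_text_alt
  simp only [List.foldl_cons, List.foldl_nil,
    PySem.List.slice_to_natCast, PySem.List.slice_natCast, PySem.List.slice_from_natCast]
  congr 1
  have h1n : pvCeil3 xs.length ≤ xs.length := by unfold pvCeil3; omega
  have h12 : pvCeil3 xs.length ≤ pvCeil23 xs.length := by unfold pvCeil3 pvCeil23; omega
  have h2n : pvCeil23 xs.length ≤ xs.length := by unfold pvCeil23; omega
  have hl1 : (xs.take (pvCeil3 xs.length)).length = pvCeil3 xs.length := by simp; omega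
  have hl2 : ((xs.drop (pvCeil3 xs.length)).take (pvCeil23 xs.length - pvCeil3 xs.length)).length
      = pvCeil23 xs.length - pvCeil3 xs.length := by simp; omega
  have hdecomp : xs = xs.take (pvCeil3 xs.length)
      ++ (xs.drop (pvCeil3 xs.length)).take (pvCeil23 xs.length - pvCeil3 xs.length)
      ++ xs.drop (pvCeil23 xs.length) := by
    conv_lhs => rw [← List.take_append_drop (pvCeil3 xs.length) xs]
    rw [List.append_assoc]
    congr 1
    conv_lhs => rw [← List.take_append_drop (pvCeil23 xs.length - pvCeil3 xs.length)
      (xs.drop (pvCeil3 xs.length))]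
    rw [List.drop_drop]
    congr 2
    omega
  -- A's fold equals the canonical fold over xs
  have hA := pv_lemA xs xs PySem.Dict.empty (fun _ h => h)
    (by intro p hp; simp [PySem.Dict.empty] at hp)
  -- chunk 1
  have hB1 := pv_lemB xs (xs.take (pvCeil3 xs.length)) []
    ((xs.drop (pvCeil3 xs.length)).take (pvCeil23 xs.length - pvCeil3 xs.length)
      ++ xs.drop (pvCeil23 xs.length)) 1
    PySem.Dict.empty (by simpa using hdecomp)
    (by intro j hj
        rw [hl1] at hj
        unfold pvLab
        rw [if_pos (by simp only [List.length_nil, Nat.zero_add]; omega)])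
    (by intro s; simp [PySem.Dict.contains, PySem.Dict.empty])
  -- chunk 2
  have hB2 := pv_lemB xs
    ((xs.drop (pvCeil3 xs.length)).take (pvCeil23 xs.length - pvCeil3 xs.length))
    (xs.take (pvCeil3 xs.length)) (xs.drop (pvCeil23 xs.length)) 2
    (pvSD xs PySem.Dict.empty (xs.take (pvCeil3 xs.length))) hdecomp
    (by intro j hj
        rw [hl2] at hj
        rw [hl1]
        unfold pvLab
        rw [if_neg (by omega), if_neg (by omega)])
    (by intro s
        rw [pv_contains_pvSD]
        simp [PySem.Dict.contains, PySem.Dict.empty])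
  -- chunk 3
  have hB3 := pv_lemB xs (xs.drop (pvCeil23 xs.length))
    (xs.take (pvCeil3 xs.length)
      ++ (xs.drop (pvCeil3 xs.length)).take (pvCeil23 xs.length - pvCeil3 xs.length)) [] 3
    (pvSD xs (pvSD xs PySem.Dict.empty (xs.take (pvCeil3 xs.length)))
      ((xs.drop (pvCeil3 xs.length)).take (pvCeil23 xs.length - pvCeil3 xs.length)))
    (by simpa using hdecomp)
    (by intro j hj
        rw [List.length_append, hl1, hl2]
        have hj' : j < xs.length - pvCeil23 xs.length := by
          have : (xs.drop (pvCeil23 xs.length)).length = xs.length - pvCeil23 xs.length := by simp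
          omega
        unfold pvLab
        rw [if_neg (by omega), if_pos (by omega)])
    (by intro s
        rw [pv_contains_pvSD, pv_contains_pvSD]
        simp only [List.mem_append]
        constructor
        · rintro ((h | h) | h)
          · simp [PySem.Dict.contains, PySem.Dict.empty] at h
          · exact Or.inl h
          · exact Or.inr h
        · rintro (h | h)
          · exact Or.inl (Or.inr h)
          · exact Or.inr h)
  rw [hA, hB1, hB2, hB3, congrArg (pvSD xs PySem.Dict.empty) hdecomp]
  unfold pvSD
  rw [List.foldl_append, List.foldl_append]
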